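-- pv_equiv track=rewrite | github.com/GopiSunware/eis-d365-petinsure | eis-dynamics-poc/src/ws7_docgen/app/agents/validate_agent.py | _build_semantic_match_reason
-- ===== SOURCE A (Python) =====
-- from typing import Any, Dict, List, Optional, Set, Tuple
--
-- def _build_semantic_match_reason(dup: Dict[str, Any]) -> str:
--     """Build detailed explanation for semantic duplicate match."""
--     matching_fields = dup.get("matching_fields", "")
--     reasons = []
--
--     if "inv:" in matching_fields:
--         # Extract invoice number
--         inv_match = [p for p in matching_fields.split("|") if p.startswith("inv:")]
--         if inv_match:
--             inv_num = inv_match[0].replace("inv:", "")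
--             reasons.append(f"Invoice #{inv_num}")
--
--     if "prov:" in matching_fields:
--         prov_match = [p for p in matching_fields.split("|") if p.startswith("prov:")]
--         if prov_match:
--             prov = prov_match[0].replace("prov:", "")
--             reasons.append(f"Provider: {prov}")
--
--     if "date:" in matching_fields:
--         date_match = [p for p in matching_fields.split("|") if p.startswith("date:")]
--         if date_match:
--             date = date_match[0].replace("date:", "")
--             reasons.append(f"Service Date: {date}")
--
--     if "amt:" in matching_fields:
--         amt_match = [p for p in matching_fields.split("|") if p.startswith("amt:")]
--         if amt_match:
--             amt = amt_match[0].replace("amt:", "")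
--             reasons.append(f"Amount: ${amt}")
--
--     if "pet:" in matching_fields:
--         pet_match = [p for p in matching_fields.split("|") if p.startswith("pet:")]
--         if pet_match:
--             pet = pet_match[0].replace("pet:", "")
--             reasons.append(f"Pet: {pet}")
--
--     if reasons:
--         return "Matching fields: " + ", ".join(reasons)
--     return "Same core claim data detected across documents"
-- ===== SOURCE B (Python) =====
-- def _build_semantic_match_reason(dup):
--     """Build detailed explanation for semantic duplicate match."""
--     labels = {"inv:": "Invoice #", "prov:": "Provider: ",
--               "date:": "Service Date: ", "amt:": "Amount: $", "pet:": "Pet: "}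
--     first = {}
--     for part in dup.get("matching_fields", "").split("|"):
--         for prefix in labels:
--             if part.startswith(prefix):
--                 first.setdefault(prefix, part.replace(prefix, ""))
--     reasons = [label + first[prefix]
--                for prefix, label in labels.items() if prefix in first]
--     if reasons:
--         return "Matching fields: " + ", ".join(reasons)
--     return "Same core claim data detected across documents"
-- ===== Notes on version B (the rewrite author's own statement) =====
-- stated objective: alternative
-- what changed: Inverts the iteration: instead of A's five copy-pasted blocks that each re-split the string and scan for their prefix, B splits once and makes a single pass over the parts, classifying each into a first-match dict keyed by prefix (setdefault), then emits the reasons from that dict in fixed table order.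
import Mathlib
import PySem

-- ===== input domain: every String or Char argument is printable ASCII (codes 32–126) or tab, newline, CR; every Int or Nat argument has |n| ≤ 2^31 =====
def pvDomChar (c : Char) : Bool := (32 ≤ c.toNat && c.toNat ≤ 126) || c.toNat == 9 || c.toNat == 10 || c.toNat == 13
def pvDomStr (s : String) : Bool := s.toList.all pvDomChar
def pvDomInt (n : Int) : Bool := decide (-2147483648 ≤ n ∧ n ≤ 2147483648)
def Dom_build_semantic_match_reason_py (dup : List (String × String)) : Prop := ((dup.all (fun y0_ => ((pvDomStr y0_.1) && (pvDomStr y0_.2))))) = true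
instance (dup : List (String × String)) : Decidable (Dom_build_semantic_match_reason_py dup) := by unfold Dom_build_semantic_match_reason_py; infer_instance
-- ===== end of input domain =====

-- B inverts A's iteration: one split and one pass over the parts building a first-match
-- dict keyed by prefix, then a fixed-order emission from that dict (objective: alternative).

-- ===== PORT A =====
-- literal transliteration of A; "|" is a nonempty literal, so split? is always `some`
-- and the `.getD []` default never fires (exact).
def build_semantic_match_reason_py (dup : List (String × String)) : String :=
  let matching_fields := PySem.Dict.getD ⟨dup⟩ "matching_fields" ""
  let reasons : List String := []
  let reasons :=
    if PySem.Str.isIn "inv:" matching_fields then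
      let inv_match := ((PySem.Str.split? matching_fields "|").getD []).filter
        (fun p => PySem.Str.startswith p "inv:")
      match inv_match with
      | p :: _ => reasons ++ ["Invoice #" ++ PySem.Str.replace p "inv:" ""]
      | [] => reasons
    else reasons
  let reasons :=
    if PySem.Str.isIn "prov:" matching_fields then
      let prov_match := ((PySem.Str.split? matching_fields "|").getD []).filter
        (fun p => PySem.Str.startswith p "prov:")
      match prov_match with
      | p :: _ => reasons ++ ["Provider: " ++ PySem.Str.replace p "prov:" ""]
      | [] => reasons
    else reasons
  let reasons :=
    if PySem.Str.isIn "date:" matching_fields then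
      let date_match := ((PySem.Str.split? matching_fields "|").getD []).filter
        (fun p => PySem.Str.startswith p "date:")
      match date_match with
      | p :: _ => reasons ++ ["Service Date: " ++ PySem.Str.replace p "date:" ""]
      | [] => reasons
    else reasons
  let reasons :=
    if PySem.Str.isIn "amt:" matching_fields then
      let amt_match := ((PySem.Str.split? matching_fields "|").getD []).filter
        (fun p => PySem.Str.startswith p "amt:")
      match amt_match with
      | p :: _ => reasons ++ ["Amount: $" ++ PySem.Str.replace p "amt:" ""]
      | [] => reasons
    else reasons
  let reasons :=
    if PySem.Str.isIn "pet:" matching_fields then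
      let pet_match := ((PySem.Str.split? matching_fields "|").getD []).filter
        (fun p => PySem.Str.startswith p "pet:")
      match pet_match with
      | p :: _ => reasons ++ ["Pet: " ++ PySem.Str.replace p "pet:" ""]
      | [] => reasons
    else reasons
  if reasons ≠ [] then "Matching fields: " ++ PySem.Str.join ", " reasons
  else "Same core claim data detected across documents"

-- ===== PORT B =====
-- Source B's `labels` literal dict: its keys/items iterate in this literal order.
def pvLabels : List (String × String) :=
  [("inv:", "Invoice #"), ("prov:", "Provider: "), ("date:", "Service Date: "),
   ("amt:", "Amount: $"), ("pet:", "Pet: ")]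

-- transliteration of Source B: split once, one pass over the parts filling `first`
-- (a dict, setdefault keeps the first match), then emit from `first` in table order;
-- `for prefix in labels` iterates the keys = the pairs' first components, and
-- `if prefix in first ... first[prefix]` is the match on get? (exact: present iff some).
def build_semantic_match_reason_py_alt (dup : List (String × String)) : String :=
  let parts := (PySem.Str.split? (PySem.Dict.getD ⟨dup⟩ "matching_fields" "") "|").getD []
  let first : PySem.Dict String String :=
    parts.foldl (fun d part =>
      pvLabels.foldl (fun d pl =>
        if PySem.Str.startswith part pl.1 then
          d.setdefault pl.1 (PySem.Str.replace part pl.1 "")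
        else d) d) ⟨[]⟩
  let reasons := pvLabels.foldl (fun acc pl =>
      match first.get? pl.1 with
      | some v => acc ++ [pl.2 ++ v]
      | none => acc) []
  if reasons ≠ [] then "Matching fields: " ++ PySem.Str.join ", " reasons
  else "Same core claim data detected across documents"

-- ===== PRECONDITION & SPEC =====
def Spec_build_semantic_match_reason_py (dup : List (String × String)) (out : String) : Prop := out = build_semantic_match_reason_py_alt dup
instance (dup : List (String × String)) (out : String) : Decidable (Spec_build_semantic_match_reason_py dup out) := by unfold Spec_build_semantic_match_reason_py; infer_instance

-- ===== CLAIM (what is proved, stated in full; the proofs are below) =====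
def Claim_equal_build_semantic_match_reason_py : Prop := ∀ (dup : List (String × String)), Dom_build_semantic_match_reason_py dup → Spec_build_semantic_match_reason_py dup (build_semantic_match_reason_py dup)

-- ===== LEMMAS AND PROOFS =====

-- one guarded extraction step, shared shape of both sides after rewriting
def pvStep (parts : List String) (pre label : String) (acc : List String) : List String :=
  match parts.find? (fun p => PySem.Str.startswith p pre) with
  | some p => acc ++ [label ++ PySem.Str.replace p pre ""]
  | none => acc

-- every piece produced by splitOn.go is an infix of t, given that the pending
-- piece (cur.reverse ++ l) and everything already in acc are infixes of t
lemma pv_go_infix (sep t : List Char) :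
    ∀ (fuel : Nat) (l cur : List Char) (acc : List (List Char)),
      (∀ q ∈ acc, q <:+: t) → (cur.reverse ++ l) <:+: t →
      ∀ p ∈ PySem.Chars.splitOn.go sep fuel l cur acc, p <:+: t := by
  intro fuel
  induction fuel with
  | zero =>
    intro l cur acc hacc hcl p hp
    rw [PySem.Chars.splitOn.go.eq_def] at hp
    simp only [List.mem_reverse, List.mem_cons] at hp
    rcases hp with h | h
    · exact h ▸ hcl
    · exact hacc p h
  | succ fuel ih =>
    intro l cur acc hacc hcl p hp
    rw [PySem.Chars.splitOn.go.eq_def] at hp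
    cases l with
    | nil =>
      simp only [List.mem_reverse, List.mem_cons] at hp
      rcases hp with h | h
      · exact h ▸ (by simpa using hcl)
      · exact hacc p h
    | cons c rest =>
      by_cases hpre : sep.isPrefixOf (c :: rest) = true
      · simp only [hpre, if_true] at hp
        refine ih _ [] (cur.reverse :: acc) ?_ ?_ p hp
        · intro q hq
          rcases List.mem_cons.mp hq with hq | hq
          · exact hq ▸ List.IsInfix.trans ⟨[], c :: rest, by simp⟩ hcl
          · exact hacc q hq
        · exact List.IsInfix.trans (List.drop_suffix _ _).isInfix
            (List.IsInfix.trans ⟨cur.reverse, [], by simp⟩ hcl)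
      · simp only [hpre] at hp
        refine ih rest (c :: cur) acc hacc ?_ p hp
        simpa using hcl

-- a part of mf.split("|") that starts with pre witnesses 'pre in mf'
lemma pv_part_isIn (mf pre p : String)
    (hp : p ∈ (PySem.Str.split? mf "|").getD [])
    (hs : PySem.Str.startswith p pre = true) :
    PySem.Str.isIn pre mf = true := by
  have hmem : p.toList ∈ PySem.Chars.splitOn mf.toList "|".toList := by
    cases h : PySem.Str.split? mf "|" with
    | none => rw [h] at hp; simp at hp
    | some parts =>
      rw [h] at hp
      simp only [Option.getD_some] at hp
      have h2 := PySem.Str.split?_map mf "|"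
      rw [h] at h2
      simp only [PySem.Chars.split?, show ("|".toList.isEmpty = false) by decide,
        Bool.false_eq_true, if_false, Option.map_some, Option.some.injEq] at h2
      rw [← h2]
      exact List.mem_map_of_mem hp
  have hinf : p.toList <:+: mf.toList := by
    have := pv_go_infix "|".toList mf.toList (mf.toList.length + 1) mf.toList [] []
      (by simp) (by simp)
    exact this p.toList hmem
  have hpref : pre.toList <+: p.toList := (PySem.Chars.startswith_iff _ _).mp (by simpa using hs)
  exact (PySem.Str.isIn_iff_infix _ _).mpr (hpref.isInfix.trans hinf)

-- A's guarded filter-block equals a first-match step (pvStep, defined below), for any prefix/label/accumulator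
lemma pv_block (mf pre label : String) (acc : List String) :
    (if PySem.Str.isIn pre mf then
      match ((PySem.Str.split? mf "|").getD []).filter
          (fun p => PySem.Str.startswith p pre) with
      | p :: _ => acc ++ [label ++ PySem.Str.replace p pre ""]
      | [] => acc
    else acc)
    =
    pvStep ((PySem.Str.split? mf "|").getD []) pre label acc := by
  unfold pvStep
  cases hf : ((PySem.Str.split? mf "|").getD []).find?
      (fun p => PySem.Str.startswith p pre) with
  | none =>
    have hfilter : ((PySem.Str.split? mf "|").getD []).filter
        (fun p => PySem.Str.startswith p pre) = [] := by
      have := List.head?_filter (p := fun p => PySem.Str.startswith p pre)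
        (l := (PySem.Str.split? mf "|").getD [])
      rw [hf] at this
      exact List.head?_eq_none_iff.mp this
    rw [hfilter]
    split_ifs <;> rfl
  | some p =>
    have hmem := List.mem_of_find?_eq_some hf
    have hsw := List.find?_some hf
    have hIn := pv_part_isIn mf pre p hmem hsw
    have hhead : (((PySem.Str.split? mf "|").getD []).filter
        (fun p => PySem.Str.startswith p pre)).head? = some p := by
      rw [List.head?_filter, hf]
    rw [if_pos hIn]
    obtain ⟨tl, htl⟩ : ∃ tl, ((PySem.Str.split? mf "|").getD []).filter
        (fun p => PySem.Str.startswith p pre) = p :: tl := by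
      cases hl : ((PySem.Str.split? mf "|").getD []).filter
          (fun p => PySem.Str.startswith p pre) with
      | nil => rw [hl] at hhead; simp at hhead
      | cons a tl =>
        rw [hl] at hhead
        simp only [List.head?_cons, Option.some.injEq] at hhead
        exact ⟨tl, by rw [hhead]⟩
    rw [htl]


-- a conditional setdefault at another key does not change get? pre
lemma pv_sd_ne (d : PySem.Dict String String) (b : Bool) (k v pre : String) (h : pre ≠ k) :
    (if b = true then d.setdefault k v else d).get? pre = d.get? pre := by
  cases b with
  | false => rfl
  | true =>
    rw [if_pos rfl]
    cases hc : d.contains k with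
    | false =>
      rw [PySem.Dict.setdefault_of_not_contains _ _ hc, PySem.Dict.get?_insert]
      exact if_neg h
    | true => rw [PySem.Dict.setdefault_of_contains _ _ hc]

-- a conditional setdefault at pre itself
lemma pv_sd_self (d : PySem.Dict String String) (b : Bool) (v pre : String) :
    (if b = true then d.setdefault pre v else d).get? pre
      = if b = true then some ((d.get? pre).getD v) else d.get? pre := by
  cases b with
  | false => rfl
  | true => rw [if_pos rfl]; exact PySem.Dict.get?_setdefault_self _ _ _

-- the inner loop over the five prefixes, seen through get? pre
lemma pv_inner (d : PySem.Dict String String) (part pre : String)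
    (hpre : pre = "inv:" ∨ pre = "prov:" ∨ pre = "date:" ∨ pre = "amt:" ∨ pre = "pet:") :
    (pvLabels.foldl (fun d pl =>
        if PySem.Str.startswith part pl.1 then
          d.setdefault pl.1 (PySem.Str.replace part pl.1 "")
        else d) d).get? pre
      = if PySem.Str.startswith part pre then
          some ((d.get? pre).getD (PySem.Str.replace part pre "")) else d.get? pre := by
  simp only [pvLabels, List.foldl]
  rcases hpre with rfl | rfl | rfl | rfl | rfl
  · rw [pv_sd_ne _ _ _ _ _ (by decide), pv_sd_ne _ _ _ _ _ (by decide),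
      pv_sd_ne _ _ _ _ _ (by decide), pv_sd_ne _ _ _ _ _ (by decide), pv_sd_self]
  · rw [pv_sd_ne _ _ _ _ _ (by decide), pv_sd_ne _ _ _ _ _ (by decide),
      pv_sd_ne _ _ _ _ _ (by decide), pv_sd_self, pv_sd_ne _ _ _ _ _ (by decide)]
  · rw [pv_sd_ne _ _ _ _ _ (by decide), pv_sd_ne _ _ _ _ _ (by decide), pv_sd_self,
      pv_sd_ne _ _ _ _ _ (by decide), pv_sd_ne _ _ _ _ _ (by decide)]
  · rw [pv_sd_ne _ _ _ _ _ (by decide), pv_sd_self, pv_sd_ne _ _ _ _ _ (by decide),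
      pv_sd_ne _ _ _ _ _ (by decide), pv_sd_ne _ _ _ _ _ (by decide)]
  · rw [pv_sd_self, pv_sd_ne _ _ _ _ _ (by decide), pv_sd_ne _ _ _ _ _ (by decide),
      pv_sd_ne _ _ _ _ _ (by decide), pv_sd_ne _ _ _ _ _ (by decide)]

-- the outer pass over the parts: get? pre is the first matching part, stripped
lemma pv_first_get (pre : String)
    (hpre : pre = "inv:" ∨ pre = "prov:" ∨ pre = "date:" ∨ pre = "amt:" ∨ pre = "pet:") :
    ∀ (parts : List String) (d : PySem.Dict String String),
      (parts.foldl (fun d part =>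
          pvLabels.foldl (fun d pl =>
            if PySem.Str.startswith part pl.1 then
              d.setdefault pl.1 (PySem.Str.replace part pl.1 "")
            else d) d) d).get? pre
        = (d.get? pre).or ((parts.find? (fun p => PySem.Str.startswith p pre)).map
            (fun p => PySem.Str.replace p pre "")) := by
  intro parts
  induction parts with
  | nil => intro d; simp
  | cons p ps ih =>
    intro d
    simp only [List.foldl_cons]
    rw [ih, pv_inner d p pre hpre]
    cases hs : PySem.Str.startswith p pre with
    | false =>
      rw [if_neg (by simp), List.find?_cons_of_neg
        (p := fun q => PySem.Str.startswith q pre) (by simp only [hs]; try decide)]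
    | true =>
      rw [if_pos rfl, List.find?_cons_of_pos
        (p := fun q => PySem.Str.startswith q pre) (by exact hs), Option.map_some]
      cases d.get? pre <;> simp

-- pv_first_get started from Source B's empty dict
lemma pv_first_get0 (pre : String)
    (hpre : pre = "inv:" ∨ pre = "prov:" ∨ pre = "date:" ∨ pre = "amt:" ∨ pre = "pet:")
    (parts : List String) :
    (parts.foldl (fun d part =>
        pvLabels.foldl (fun d pl =>
          if PySem.Str.startswith part pl.1 then
            d.setdefault pl.1 (PySem.Str.replace part pl.1 "")
          else d) d) (⟨[]⟩ : PySem.Dict String String)).get? pre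
      = (parts.find? (fun p => PySem.Str.startswith p pre)).map
          (fun p => PySem.Str.replace p pre "") := by
  rw [pv_first_get pre hpre parts ⟨[]⟩]
  have h0 : (⟨[]⟩ : PySem.Dict String String).get? pre = none := rfl
  rw [h0, Option.none_or]

-- a match on the stripped find? equals pvStep
lemma pv_blockB (parts : List String) (pre label : String) (acc : List String) :
    (match (parts.find? (fun p => PySem.Str.startswith p pre)).map
        (fun p => PySem.Str.replace p pre "") with
    | some v => acc ++ [label ++ v]
    | none => acc)
    = pvStep parts pre label acc := by
  unfold pvStep
  cases parts.find? (fun p => PySem.Str.startswith p pre) <;> rfl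

-- Source B's emission fold over the table equals the five nested pvStep blocks
lemma pv_emit (parts : List String) (d : PySem.Dict String String)
    (h : ∀ pre : String,
      (pre = "inv:" ∨ pre = "prov:" ∨ pre = "date:" ∨ pre = "amt:" ∨ pre = "pet:") →
      d.get? pre = (parts.find? (fun p => PySem.Str.startswith p pre)).map
        (fun p => PySem.Str.replace p pre "")) :
    pvLabels.foldl (fun acc pl =>
      match d.get? pl.1 with
      | some v => acc ++ [pl.2 ++ v]
      | none => acc) []
    = pvStep parts "pet:" "Pet: " (pvStep parts "amt:" "Amount: $"
        (pvStep parts "date:" "Service Date: " (pvStep parts "prov:" "Provider: "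
          (pvStep parts "inv:" "Invoice #" [])))) := by
  simp only [pvLabels, List.foldl]
  rw [h "inv:" (Or.inl rfl), h "prov:" (Or.inr (Or.inl rfl)),
    h "date:" (Or.inr (Or.inr (Or.inl rfl))),
    h "amt:" (Or.inr (Or.inr (Or.inr (Or.inl rfl)))),
    h "pet:" (Or.inr (Or.inr (Or.inr (Or.inr rfl))))]
  rw [pv_blockB, pv_blockB, pv_blockB, pv_blockB, pv_blockB]

-- ===== VERDICT (by name: the statement is the Claim_ definition above) =====
theorem build_semantic_match_reason_py_spec : Claim_equal_build_semantic_match_reason_py := by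
  intro dup _
  unfold Spec_build_semantic_match_reason_py
  unfold build_semantic_match_reason_py build_semantic_match_reason_py_alt
  simp only []
  have hd := fun pre hp => pv_first_get0 pre hp
    ((PySem.Str.split? (PySem.Dict.getD ⟨dup⟩ "matching_fields" "") "|").getD [])
  rw [pv_emit _ _ hd]
  rw [pv_block, pv_block, pv_block, pv_block, pv_block]
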